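-- pv_equiv track=rewrite | github.com/gitravp/strandsolver | strandbot1.py | letters
-- ===== SOURCE A (Python) =====
-- def letters(board):
--     is_in=[]    #initialise list of letters that ARE IN our board
--     not_in=['A','B','C','D','E','F','G','H','I','J','K','L','M','N','O','P','Q','R','S','T','U','V','W','X','Y','Z']    #list of letters NOT IN board(initialised with all letters,removed as we detect them on the board)
--     #not_in=['a','b','c','d','e','f','g','h','i','j','k','l','m','n','o','p','q','r','s','t','u','v','w','x','y','z']
--     for i in board:    #iterate through board letters list
--         for j in i:
--             if(j not in is_in):    #if the letter is in the 'not_in'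
--                 is_in.append(j)    #remove from not_in list
--                 not_in.remove(j)   #add to is_in list
--     is_in.sort()    #sort list before returning
--     return(is_in,not_in)
-- ===== SOURCE B (Python) =====
-- ALPH = list('ABCDEFGHIJKLMNOPQRSTUVWXYZ')
--
-- def letters(board):
--     seen = [False] * 26                  # presence table indexed by alphabet position
--     for row in board:
--         for c in row:
--             seen[ALPH.index(c)] = True   # ValueError on a cell outside 'A'..'Z'
--     is_in = []
--     not_in = []
--     for c, flag in zip(ALPH, seen):      # one pass emits both lists, already ordered
--         (is_in if flag else not_in).append(c)
--     return (is_in, not_in)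
-- ===== Notes on version B (the rewrite author's own statement) =====
-- stated objective: alternative
-- what changed: B replaces A's grow-is_in/shrink-not_in list surgery and final sort by a fixed 26-slot boolean presence table indexed by alphabet position (ALPH.index marks each cell, still raising ValueError on a non-letter), then a single zip pass over the alphabet and the table emits is_in and not_in already in alphabetical order, so no sort and no list.remove are ever performed.
import Mathlib
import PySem

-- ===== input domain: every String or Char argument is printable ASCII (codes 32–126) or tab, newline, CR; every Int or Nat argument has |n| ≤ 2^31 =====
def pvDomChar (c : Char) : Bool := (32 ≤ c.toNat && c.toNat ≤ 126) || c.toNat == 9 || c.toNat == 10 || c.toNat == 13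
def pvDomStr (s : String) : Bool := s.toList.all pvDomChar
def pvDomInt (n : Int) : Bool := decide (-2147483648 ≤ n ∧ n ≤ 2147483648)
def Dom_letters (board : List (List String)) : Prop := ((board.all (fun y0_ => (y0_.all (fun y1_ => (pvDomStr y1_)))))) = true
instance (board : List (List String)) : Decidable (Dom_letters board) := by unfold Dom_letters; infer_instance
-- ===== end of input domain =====

-- B replaces A's grow/shrink list surgery and final sort by a 26-slot boolean presence
-- table indexed via ALPH.index (still ValueError on a non-letter), then one zip pass
-- over the alphabet and the table emits both lists already ordered (objective: alternative).

-- ===== PORT A =====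
-- the alphabet literal A spells out (B's python builds the same list from 'A'..'Z')
def lettersAlphabet : List String :=
  ["A","B","C","D","E","F","G","H","I","J","K","L","M","N","O","P","Q","R","S","T","U","V","W","X","Y","Z"]

-- state: some (is_in, not_in); none = ValueError has been raised by not_in.remove(j)
def lettersStep (st : Option (List String × List String)) (j : String) :
    Option (List String × List String) :=
  match st with
  | none => none
  | some (isIn, notIn) =>
    if isIn.contains j then some (isIn, notIn)
    else
      match PySem.List.remove? notIn j with
      | none => none                       -- Python: ValueError from not_in.remove(j)
      | some notIn' => some (isIn ++ [j], notIn')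

def letters (board : List (List String)) : List String × List String :=
  match board.foldl (fun st row => row.foldl lettersStep st) (some ([], lettersAlphabet)) with
  | none => ([], [])                       -- unreachable under Pre_letters (A raised)
  | some (isIn, notIn) => (PySem.List.sorted isIn (fun x => x) false, notIn)

-- ===== PORT B =====
-- state: some seen (the 26-slot table); none = ValueError has been raised by ALPH.index(c)
def lettersMarkStep (st : Option (List Bool)) (c : String) : Option (List Bool) :=
  match st with
  | none => none
  | some seen =>
    match PySem.List.index? lettersAlphabet c with
    | none => none                       -- Python: ValueError from ALPH.index(c)
    | some i => some (seen.set i true)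

def letters_alt (board : List (List String)) : List String × List String :=
  match board.foldl (fun st row => row.foldl lettersMarkStep st) (some (List.replicate 26 false)) with
  | none => ([], [])                     -- unreachable under Pre_letters (B raised)
  | some seen =>
    (lettersAlphabet.zip seen).foldl
      (fun acc cf => if cf.2 then (acc.1 ++ [cf.1], acc.2) else (acc.1, acc.2 ++ [cf.1]))
      ([], [])

-- ===== PRECONDITION & SPEC =====
-- Pre_ excludes boards with a string outside 'A'..'Z': there A's not_in.remove raises ValueError.
def Pre_letters (board : List (List String)) : Prop :=
  ∀ row ∈ board, ∀ s ∈ row, s ∈ lettersAlphabet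
instance (board : List (List String)) : Decidable (Pre_letters board) := by
  unfold Pre_letters; infer_instance
def pvWitness_letters : List (List String) := [["C","A"],["B","A"]]

def Spec_letters (board : List (List String)) (out : List String × List String) : Prop :=
  out = letters_alt board
instance (board : List (List String)) (out : List String × List String) : Decidable (Spec_letters board out) := by unfold Spec_letters; infer_instance

-- ===== CLAIM (what is proved, stated in full; the proofs are below) =====
def Claim_equal_letters : Prop := ∀ (board : List (List String)), Dom_letters board → Pre_letters board → Spec_letters board (letters board)

-- ===== LEMMAS AND PROOFS =====

-- A's loop, flattened to one pass, keeps not_in = alphabet minus the letters seen so far.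
lemma lettersStep_invariant (xs : List String) (d : List String)
    (hxs : ∀ s ∈ xs, s ∈ lettersAlphabet) :
    xs.foldl lettersStep
      (some (d, lettersAlphabet.filter (fun c => !(d.contains c)))) =
    some (PySem.Set.update d xs,
      lettersAlphabet.filter (fun c => !((PySem.Set.update d xs).contains c))) := by
  induction xs generalizing d with
  | nil => simp [PySem.Set.update]
  | cons x xs ih =>
    have hx : x ∈ lettersAlphabet := hxs x (by simp)
    rw [PySem.Set.update_cons]
    by_cases hmem : x ∈ d
    · have : lettersStep
          (some (d, lettersAlphabet.filter (fun c => !(d.contains c)))) x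
          = some (d, lettersAlphabet.filter (fun c => !(d.contains c))) := by
        simp [lettersStep, hmem]
      rw [List.foldl_cons, this, PySem.Set.add_of_mem hmem]
      exact ih d (fun s hs => hxs s (by simp [hs]))
    · have hc : d.contains x = false := by simpa using hmem
      have hxf : x ∈ lettersAlphabet.filter (fun c => !(d.contains c)) := by
        simp [List.mem_filter, hx, hmem]
      have hrem : PySem.List.remove? (lettersAlphabet.filter (fun c => !(d.contains c))) x
          = some ((lettersAlphabet.filter (fun c => !(d.contains c))).erase x) :=
        PySem.List.remove?_eq_some_erase _ x hxf
      have hnodup : (lettersAlphabet.filter (fun c => !(d.contains c))).Nodup :=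
        List.Nodup.filter _ (by decide)
      have herase : (lettersAlphabet.filter (fun c => !(d.contains c))).erase x
          = lettersAlphabet.filter (fun c => !((d ++ [x]).contains c)) := by
        rw [hnodup.erase_eq_filter, List.filter_filter]
        apply List.filter_congr
        intro c _
        by_cases hcx : c = x <;> simp [hcx, hmem]
      have hstep : lettersStep
          (some (d, lettersAlphabet.filter (fun c => !(d.contains c)))) x
          = some (d ++ [x], lettersAlphabet.filter (fun c => !((d ++ [x]).contains c))) := by
        simp only [lettersStep, hc, Bool.false_eq_true, if_false, hrem, herase]
      rw [List.foldl_cons, hstep, PySem.Set.add_of_not_mem hmem]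
      exact ih (d ++ [x]) (fun s hs => hxs s (by simp [hs]))

-- setting position index?(x) of a mapped-over-l table rewrites the map's function at x
lemma lettersSetIndexMap (l : List String) (x : String) (i : Nat) (f g : String → Bool)
    (h : PySem.List.index? l x = some i) (hnd : l.Nodup)
    (hgx : g x = true) (hg : ∀ y ∈ l, y ≠ x → g y = f y) :
    (l.map f).set i true = l.map g := by
  obtain ⟨hk, hx, -⟩ := PySem.List.getElem_of_index?_eq_some h
  apply List.ext_getElem
  · simp
  · intro j hj1 hj2
    simp only [List.length_set, List.length_map] at hj1
    by_cases hji : j = i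
    · subst hji
      rw [List.getElem_set_self (by simpa using hj1), List.getElem_map, hx]
      exact hgx.symm
    · rw [List.getElem_set_ne (fun h' => hji h'.symm), List.getElem_map, List.getElem_map]
      have hne : l[j] ≠ x := by
        intro heq
        exact hji (hnd.getElem_inj_iff.mp (heq.trans hx.symm))
      exact (hg l[j] (List.getElem_mem hj1) hne).symm

-- B's mark fold keeps the table = alphabet mapped through membership in the letters seen so far
lemma lettersMark_invariant (xs : List String) (d : List String)
    (hxs : ∀ s ∈ xs, s ∈ lettersAlphabet) :
    xs.foldl lettersMarkStep
      (some (lettersAlphabet.map (fun c => decide (c ∈ d)))) =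
    some (lettersAlphabet.map (fun c => decide (c ∈ d ++ xs))) := by
  induction xs generalizing d with
  | nil => simp
  | cons x xs ih =>
    have hx : x ∈ lettersAlphabet := hxs x (by simp)
    obtain ⟨i, hi⟩ := Option.isSome_iff_exists.mp
      ((PySem.List.index?_isSome_iff lettersAlphabet x).mpr hx)
    have hstep : lettersMarkStep
        (some (lettersAlphabet.map (fun c => decide (c ∈ d)))) x
        = some (lettersAlphabet.map (fun c => decide (c ∈ d ++ [x]))) := by
      simp only [lettersMarkStep, hi]
      congr 1
      exact lettersSetIndexMap lettersAlphabet x i _ _ hi (by decide)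
        (by simp) (fun y _ hyx => by simp [hyx])
    rw [List.foldl_cons, hstep]
    have := ih (d ++ [x]) (fun s hs => hxs s (by simp [hs]))
    simpa [List.append_assoc] using this

-- B's emission fold over (letter, flag) pairs appends the flagged letters left, the rest right
lemma lettersEmitFold (l : List (String × Bool)) (a b : List String) :
    l.foldl (fun acc cf => if cf.2 then (acc.1 ++ [cf.1], acc.2) else (acc.1, acc.2 ++ [cf.1])) (a, b)
    = (a ++ (l.filter (fun cf => cf.2)).map (fun cf => cf.1),
       b ++ (l.filter (fun cf => !cf.2)).map (fun cf => cf.1)) := by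
  induction l generalizing a b with
  | nil => simp
  | cons x l ih =>
    by_cases hx : x.2 = true
    · simp [hx, ih]
    · simp only [Bool.not_eq_true] at hx
      simp [hx, ih]

-- zipping a list with itself mapped = mapping to pairs
lemma lettersZipMap (l : List String) (g : String → Bool) :
    l.zip (l.map g) = l.map (fun c => (c, g c)) := by
  induction l with
  | nil => simp
  | cons x l ih => simp [ih]

-- filtering the paired-up list by a flag predicate and projecting = filtering the list
lemma lettersMapPairFilter (l : List String) (g : String → Bool) (q : Bool → Bool) :
    ((l.map (fun c => (c, g c))).filter (fun cf => q cf.2)).map (fun cf => cf.1)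
      = l.filter (fun c => q (g c)) := by
  induction l with
  | nil => simp
  | cons x l ih =>
    by_cases hx : q (g x) = true
    · simp [hx, ih]
    · simp only [Bool.not_eq_true] at hx
      simp [hx, ih]

-- the alphabet literal is strictly increasing (via the Char list behind the one-char strings)
lemma lettersAlphabet_pairwise : lettersAlphabet.Pairwise (· < ·) := by
  have he : lettersAlphabet = (['A','B','C','D','E','F','G','H','I','J','K','L','M','N','O','P','Q','R','S','T','U','V','W','X','Y','Z'].map (fun c => String.ofList [c])) := rfl
  rw [he, List.pairwise_map]
  have hp : (['A','B','C','D','E','F','G','H','I','J','K','L','M','N','O','P','Q','R','S','T','U','V','W','X','Y','Z'] : List Char).Pairwise (· < ·) := by decide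
  refine hp.imp ?_
  intro a b h
  show String.ofList [a] < String.ofList [b]
  rw [String.lt_iff_toList_lt]
  simp only [String.toList_ofList]
  exact List.Lex.rel h

-- sorting a nodup sublist of the alphabet = filtering the alphabet by membership
lemma sorted_eq_alphabet_filter (s : List String) (hnd : s.Nodup)
    (hsub : ∀ x ∈ s, x ∈ lettersAlphabet) :
    PySem.List.sorted s (fun x => x) false
      = lettersAlphabet.filter (fun c => s.contains c) := by
  apply PySem.List.sorted_eq_of_perm_of_pairwise_lt
  · apply (List.perm_ext_iff_of_nodup (List.Nodup.filter _ (by decide)) hnd).mpr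
    intro a
    constructor
    · intro ha
      rcases List.mem_filter.mp ha with ⟨-, hc⟩
      simpa using hc
    · intro ha
      exact List.mem_filter.mpr ⟨hsub a ha, by simpa using ha⟩
  · exact List.Pairwise.filter _ lettersAlphabet_pairwise

lemma lettersMapPairFilterPos (l : List String) (g : String → Bool) :
    ((l.map (fun c => (c, g c))).filter (fun cf => cf.2)).map (fun cf => cf.1)
      = l.filter g :=
  lettersMapPairFilter l g (fun b => b)

lemma lettersMapPairFilterNeg (l : List String) (g : String → Bool) :
    ((l.map (fun c => (c, g c))).filter (fun cf => !cf.2)).map (fun cf => cf.1)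
      = l.filter (fun c => !g c) :=
  lettersMapPairFilter l g (fun b => !b)

-- ===== VERDICT (by name: the statement is the Claim_ definition above) =====
theorem letters_spec : Claim_equal_letters := by
  intro board _ hpre
  unfold Spec_letters letters letters_alt
  have hflat : ∀ s ∈ board.flatten, s ∈ lettersAlphabet := by
    intro s hs
    rcases List.mem_flatten.mp hs with ⟨row, hrow, hsrow⟩
    exact hpre row hrow s hsrow
  have hA : board.foldl (fun st row => row.foldl lettersStep st) (some ([], lettersAlphabet)) =
      some (PySem.Set.ofList board.flatten,
        lettersAlphabet.filter (fun c => !((PySem.Set.ofList board.flatten).contains c))) := by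
    rw [← List.foldl_flatten]
    have := lettersStep_invariant board.flatten [] hflat
    simpa [PySem.Set.ofList_eq_foldl, PySem.Set.update] using this
  have hB : board.foldl (fun st row => row.foldl lettersMarkStep st) (some (List.replicate 26 false))
      = some (lettersAlphabet.map (fun c => decide (c ∈ board.flatten))) := by
    rw [← List.foldl_flatten]
    have h0 : (List.replicate 26 false)
        = lettersAlphabet.map (fun c => decide (c ∈ ([] : List String))) := by decide
    rw [h0]
    simpa using lettersMark_invariant board.flatten [] hflat
  rw [hA, hB]
  dsimp only
  rw [lettersZipMap, lettersEmitFold, lettersMapPairFilterPos, lettersMapPairFilterNeg]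
  simp only [List.nil_append]
  have hnd : (PySem.Set.ofList board.flatten : List String).Nodup :=
    PySem.Set.nodup_ofList _
  have hsub : ∀ x ∈ (PySem.Set.ofList board.flatten : List String), x ∈ lettersAlphabet := by
    intro x hx
    exact hflat x (by simpa [PySem.Set.mem_ofList] using hx)
  rw [sorted_eq_alphabet_filter _ hnd hsub]
  refine congrArg₂ Prod.mk ?_ ?_ <;>
    (apply List.filter_congr; intro c _; simp [PySem.Set.mem_ofList])
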